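-- pv_equiv track=rewrite | github.com/pypi-data/pypi-mirror-275 | packages/number2text/number2text-0.0.1.tar.gz/number2text-0.0.1/number2text/lang/fy.py | convert_less_than_thousand
-- ===== SOURCE A (Python) =====
-- _ones= ["", "ien", "twa", "trije", "fjouwer", "fiif", "seis", "sân", "acht", "njoggen"]
--
-- _teens = ["tsien", "alve", "tolve", "trettjin", "fjirtjin", "fyftjin", "sechtjin", "santjin", "achttjin", "njoggentjin"]
--
-- _tens = ["", "", "tweintich", "tritich", "fjirtich", "fyftich", "sechstich", "santich", "tachtich", "njoggentich"]
--
-- _hundreds = ["", "hûndert", "twahûndert", "trijehûndert", "fjouwerhûndert", "fiifhûndert", "seishûndert", "sânhûndert", "achthûndert", "njoggenhûndert"]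
--
-- def convert_less_than_thousand(number):
--     if number < 10:
--         return _ones[number]
--     elif number < 20:
--         return _teens[number - 10]
--     elif number < 100:
--         tens, ones = divmod(number, 10)
--         if ones == 0:
--             return _tens[tens]
--         else:
--             return _tens[tens] + " " + _ones[ones]
--     else:
--         hundreds, less_than_hundred = divmod(number, 100)
--         if less_than_hundred == 0:
--             return _hundreds[hundreds]
--         else:
--             return _hundreds[hundreds] + " " + convert_less_than_thousand(less_than_hundred)
-- ===== SOURCE B (Python) =====
-- _ones= ["", "ien", "twa", "trije", "fjouwer", "fiif", "seis", "sân", "acht", "njoggen"]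
--
-- _teens = ["tsien", "alve", "tolve", "trettjin", "fjirtjin", "fyftjin", "sechtjin", "santjin", "achttjin", "njoggentjin"]
--
-- _tens = ["", "", "tweintich", "tritich", "fjirtich", "fyftich", "sechstich", "santich", "tachtich", "njoggentich"]
--
-- _hundreds = ["", "hûndert", "twahûndert", "trijehûndert", "fjouwerhûndert", "fiifhûndert", "seishûndert", "sânhûndert", "achthûndert", "njoggenhûndert"]
--
-- def convert_less_than_thousand(number):
--     if number < 10:
--         return _ones[number]
--     parts = []
--     if number >= 100:
--         parts.append(_hundreds[number // 100])
--         number %= 100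
--     if number != 0:
--         if number < 10:
--             parts.append(_ones[number])
--         elif number < 20:
--             parts.append(_teens[number - 10])
--         else:
--             tens, ones = divmod(number, 10)
--             parts.append(_tens[tens])
--             if ones != 0:
--                 parts.append(_ones[ones])
--     return " ".join(parts)
-- ===== Notes on version B (the rewrite author's own statement) =====
-- stated objective: alternative
-- what changed: Replaces A's recursive string-concatenation (hundreds word + ' ' + recursive call) with a single-pass iterative accumulation of word parts into a list followed by one ' '.join.
import Mathlib
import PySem

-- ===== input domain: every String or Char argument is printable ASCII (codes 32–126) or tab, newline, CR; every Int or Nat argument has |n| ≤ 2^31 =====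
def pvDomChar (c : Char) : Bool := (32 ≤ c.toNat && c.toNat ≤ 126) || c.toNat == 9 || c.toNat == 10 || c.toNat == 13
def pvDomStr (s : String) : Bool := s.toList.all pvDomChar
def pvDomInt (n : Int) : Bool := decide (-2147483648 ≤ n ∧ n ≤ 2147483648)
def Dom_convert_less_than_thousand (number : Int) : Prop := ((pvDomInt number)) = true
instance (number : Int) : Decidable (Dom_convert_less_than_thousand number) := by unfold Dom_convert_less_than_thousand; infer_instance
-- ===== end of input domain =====

-- B replaces A's recursion + string concatenation by one pass that collects the word parts
-- into a list and joins them once; same return value on every input where A returns.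

def fyOnes : List String := ["", "ien", "twa", "trije", "fjouwer", "fiif", "seis", "sân", "acht", "njoggen"]
def fyTeens : List String := ["tsien", "alve", "tolve", "trettjin", "fjirtjin", "fyftjin", "sechtjin", "santjin", "achttjin", "njoggentjin"]
def fyTens : List String := ["", "", "tweintich", "tritich", "fjirtich", "fyftich", "sechstich", "santich", "tachtich", "njoggentich"]
def fyHundreds : List String := ["", "hûndert", "twahûndert", "trijehûndert", "fjouwerhûndert", "fiifhûndert", "seishûndert", "sânhûndert", "achthûndert", "njoggenhûndert"]

-- ===== PORT A =====
def convert_less_than_thousand (number : Int) : String :=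
  if _h10 : number < 10 then PySem.List.pyGetD fyOnes number ""
  else if _h20 : number < 20 then PySem.List.pyGetD fyTeens (number - 10) ""
  else if _h100 : number < 100 then
    let tens := PySem.Int.floordiv number 10
    let ones := PySem.Int.mod number 10
    if ones = 0 then PySem.List.pyGetD fyTens tens ""
    else PySem.List.pyGetD fyTens tens "" ++ " " ++ PySem.List.pyGetD fyOnes ones ""
  else
    let hundreds := PySem.Int.floordiv number 100
    let lth := PySem.Int.mod number 100
    if lth = 0 then PySem.List.pyGetD fyHundreds hundreds ""
    else PySem.List.pyGetD fyHundreds hundreds "" ++ " " ++ convert_less_than_thousand lth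
termination_by number.toNat
decreasing_by
  have hm : PySem.Int.mod number 100 = number % 100 :=
    PySem.Int.mod_eq_emod_of_pos (by norm_num)
  have h1 := Int.emod_nonneg number (by norm_num : (100:Int) ≠ 0)
  have h2 := Int.emod_lt_of_pos number (by norm_num : (0:Int) < 100)
  simp only [hm]
  omega

-- ===== PORT B =====
def convert_less_than_thousand_alt (number : Int) : String :=
  if number < 10 then PySem.List.pyGetD fyOnes number ""
  else
    let parts : List String := []
    let (parts, number) :=
      if 100 ≤ number then
        (parts ++ [PySem.List.pyGetD fyHundreds (PySem.Int.floordiv number 100) ""],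
         PySem.Int.mod number 100)
      else (parts, number)
    let parts :=
      if number ≠ 0 then
        if number < 10 then parts ++ [PySem.List.pyGetD fyOnes number ""]
        else if number < 20 then parts ++ [PySem.List.pyGetD fyTeens (number - 10) ""]
        else
          let tens := PySem.Int.floordiv number 10
          let ones := PySem.Int.mod number 10
          let parts := parts ++ [PySem.List.pyGetD fyTens tens ""]
          if ones ≠ 0 then parts ++ [PySem.List.pyGetD fyOnes ones ""] else parts
      else parts
    PySem.Str.join " " parts

-- ===== PRECONDITION & SPEC =====
-- Pre_ excludes exactly the inputs on which A raises IndexError (a negative or hundreds index past the ten-entry word lists).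
def Pre_convert_less_than_thousand (number : Int) : Prop := -10 ≤ number ∧ number < 1000
instance (number : Int) : Decidable (Pre_convert_less_than_thousand number) := by unfold Pre_convert_less_than_thousand; infer_instance
def pvWitness_convert_less_than_thousand : Int := (215)

def Spec_convert_less_than_thousand (number : Int) (out : String) : Prop := out = convert_less_than_thousand_alt number
instance (number : Int) (out : String) : Decidable (Spec_convert_less_than_thousand number out) := by unfold Spec_convert_less_than_thousand; infer_instance

-- ===== CLAIM (what is proved, stated in full; the proofs are below) =====
def Claim_equal_convert_less_than_thousand : Prop := ∀ (number : Int), Dom_convert_less_than_thousand number → Pre_convert_less_than_thousand number → Spec_convert_less_than_thousand number (convert_less_than_thousand number)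

-- ===== LEMMAS AND PROOFS =====

theorem join_one (a : String) : PySem.Str.join " " [a] = a := by
  have h : (PySem.Str.join " " [a]).toList = a.toList := by
    simp [PySem.Str.join, PySem.Chars.join, List.intercalate]
  exact String.toList_inj.mp h

theorem join_two (a b : String) : PySem.Str.join " " [a, b] = a ++ " " ++ b := by
  have h : (PySem.Str.join " " [a, b]).toList = (a ++ " " ++ b).toList := by
    simp [PySem.Str.join, PySem.Chars.join, List.intercalate, String.toList_append]
  exact String.toList_inj.mp h

theorem join_three (a b c : String) :
    PySem.Str.join " " [a, b, c] = a ++ " " ++ (b ++ " " ++ c) := by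
  have h : (PySem.Str.join " " [a, b, c]).toList = (a ++ " " ++ (b ++ " " ++ c)).toList := by
    simp [PySem.Str.join, PySem.Chars.join, List.intercalate, String.toList_append]
  exact String.toList_inj.mp h

theorem mod_bounds (n b : Int) (hb : 0 < b) :
    0 ≤ PySem.Int.mod n b ∧ PySem.Int.mod n b < b := by
  rw [PySem.Int.mod_eq_emod_of_pos hb]
  exact ⟨Int.emod_nonneg n (by omega), Int.emod_lt_of_pos n hb⟩

-- A on 0 < m < 100 equals the tail words B appends there
theorem A_small (m : Int) (h0 : 0 < m) (h100 : m < 100) :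
    convert_less_than_thousand m =
      PySem.Str.join " "
        (if m < 10 then [PySem.List.pyGetD fyOnes m ""]
         else if m < 20 then [PySem.List.pyGetD fyTeens (m - 10) ""]
         else if PySem.Int.mod m 10 ≠ 0 then
           [PySem.List.pyGetD fyTens (PySem.Int.floordiv m 10) "",
            PySem.List.pyGetD fyOnes (PySem.Int.mod m 10) ""]
         else [PySem.List.pyGetD fyTens (PySem.Int.floordiv m 10) ""]) := by
  by_cases h10 : m < 10
  · rw [convert_less_than_thousand]
    simp [h10, join_one]
  · by_cases h20 : m < 20
    · rw [convert_less_than_thousand]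
      simp [h10, h20, join_one]
    · have hmm : PySem.Int.mod m 10 = m % 10 := PySem.Int.mod_eq_emod_of_pos (by norm_num)
      by_cases ho : PySem.Int.mod m 10 = 0
      · have hdvd : 10 ∣ m := by rw [hmm] at ho; omega
        rw [convert_less_than_thousand]
        simp [h10, h20, h100, ho, hmm, hdvd, join_one]
      · have hnd : ¬ 10 ∣ m := by rw [hmm] at ho; omega
        rw [convert_less_than_thousand]
        simp [h10, h20, h100, ho, hmm, hnd, join_two]

-- ===== VERDICT (by name: the statement is the Claim_ definition above) =====
theorem convert_less_than_thousand_spec : Claim_equal_convert_less_than_thousand := by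
  intro n _ hpre
  unfold Spec_convert_less_than_thousand
  obtain ⟨hlo, hhi⟩ := hpre
  by_cases h10 : n < 10
  · rw [convert_less_than_thousand, convert_less_than_thousand_alt]
    simp [h10]
  · by_cases h100 : n < 100
    · -- 10 ≤ n < 100 : no hundreds part, the tail lemma applies to n itself
      have hA := A_small n (by omega) h100
      rw [convert_less_than_thousand_alt]
      simp only [if_neg h10, if_neg (by omega : ¬ (100:Int) ≤ n)]
      rw [hA]
      by_cases h20 : n < 20
      · simp [h10, h20, show n ≠ 0 by omega]
      · by_cases ho : PySem.Int.mod n 10 = 0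
        · simp [h10, h20, ho, show n ≠ 0 by omega]
        · simp [h10, h20, ho, show n ≠ 0 by omega]
    · -- 100 ≤ n < 1000
      obtain ⟨hr0, hr100⟩ := mod_bounds n 100 (by norm_num)
      rw [convert_less_than_thousand, convert_less_than_thousand_alt]
      simp only [dif_neg h10, dif_neg (by omega : ¬ n < 20), dif_neg h100,
        if_neg h10, if_pos (by omega : (100:Int) ≤ n)]
      have hm100 : PySem.Int.mod n 100 = n % 100 := PySem.Int.mod_eq_emod_of_pos (by norm_num)
      have hm10 : PySem.Int.mod (PySem.Int.mod n 100) 10 = n % 100 % 10 := by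
        rw [hm100]; exact PySem.Int.mod_eq_emod_of_pos (by norm_num)
      by_cases hr : PySem.Int.mod n 100 = 0
      · have hdvd : 100 ∣ n := by rw [hm100] at hr; omega
        simp [hr, hdvd, join_one]
      · rw [if_neg hr]
        have hnd : ¬ 100 ∣ n := by rw [hm100] at hr; omega
        have hA := A_small (PySem.Int.mod n 100) (by omega) hr100
        rw [hA]
        rw [hm100] at hr
        by_cases h10' : n % 100 < 10
        · simp [hm100, hr, hnd, h10', join_one, join_two]
        · by_cases h20' : n % 100 < 20
          · simp [hm100, hr, hnd, h10', h20', join_one, join_two]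
          · by_cases ho : n % 100 % 10 = 0
            · have hdvd10 : 10 ∣ n := by omega
              simp [hm100, hm10, hr, hnd, h10', h20', ho, hdvd10, join_one, join_two]
            · have hnd10 : ¬ 10 ∣ n := by omega
              simp [hm100, hm10, hr, hnd, h10', h20', ho, hnd10, join_two, join_three]
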